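-- pv_equiv track=rewrite | github.com/Neeraja0613/codemind-python | count_partitions.py | countPartitions
-- ===== SOURCE A (Python) =====
-- from typing import List
--
-- def countPartitions(nums: List[int]) -> int:
--     t=sum(nums)
--     l=0
--     c=0
--     for i in range(len(nums)-1):
--         l+=nums[i]
--         r=t-l
--         if l%2==r%2:
--             c+=1
--     return c
-- ===== SOURCE B (Python) =====
-- def countPartitions(nums):
--     t = sum(nums)
--     return max(0, len(nums) - 1) if t % 2 == 0 else 0
-- ===== Notes on version B (the rewrite author's own statement) =====
-- stated objective: simpler
-- what changed: Replaces the prefix-sum loop with a closed form: since prefix+suffix = total, the parities match at every split iff the total is even, so the answer is max(0, len-1) when sum(nums) is even and 0 otherwise.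
import Mathlib
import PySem

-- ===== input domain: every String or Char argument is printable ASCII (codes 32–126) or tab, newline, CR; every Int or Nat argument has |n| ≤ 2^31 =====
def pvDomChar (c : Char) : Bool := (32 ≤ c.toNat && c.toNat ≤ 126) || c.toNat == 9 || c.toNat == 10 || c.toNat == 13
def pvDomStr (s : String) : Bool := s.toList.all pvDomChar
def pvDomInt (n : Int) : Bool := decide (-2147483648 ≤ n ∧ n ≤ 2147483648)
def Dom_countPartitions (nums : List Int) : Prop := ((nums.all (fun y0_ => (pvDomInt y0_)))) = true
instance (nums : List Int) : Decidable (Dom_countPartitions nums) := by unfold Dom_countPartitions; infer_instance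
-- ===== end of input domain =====

-- ===== PORT A =====
-- B replaces the split loop by a parity closed form: answer is max(0, len-1) iff sum is even.
-- Literal port of A: t = sum, then loop i in range(len-1) accumulating l and counting parity matches.
-- nums[i] is always in range here, so pyGet? is some; .getD 0 never fires.
def countPartitions (nums : List Int) : Int :=
  let t := nums.sum
  let st := (PySem.List.pyRange 0 ((nums.length : Int) - 1) 1).foldl
    (fun (st : Int × Int) i =>
      let l := st.1 + (PySem.List.pyGet? nums i).getD 0
      let r := t - l
      if PySem.Int.mod l 2 == PySem.Int.mod r 2 then (l, st.2 + 1) else (l, st.2))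
    ((0 : Int), (0 : Int))
  st.2

-- ===== PORT B =====
def countPartitions_alt (nums : List Int) : Int :=
  let t := nums.sum
  if PySem.Int.mod t 2 == 0 then max 0 ((nums.length : Int) - 1) else 0

-- ===== PRECONDITION & SPEC =====
def Spec_countPartitions (nums : List Int) (out : Int) : Prop := out = countPartitions_alt nums
instance (nums : List Int) (out : Int) : Decidable (Spec_countPartitions nums out) := by unfold Spec_countPartitions; infer_instance

-- ===== CLAIM (what is proved, stated in full; the proofs are below) =====
def Claim_equal_countPartitions : Prop := ∀ (nums : List Int), Dom_countPartitions nums → Spec_countPartitions nums (countPartitions nums)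

-- ===== LEMMAS AND PROOFS =====

-- the branch condition in A's loop depends only on the parity of t
lemma cond_iff (t l : Int) :
    (PySem.Int.mod l 2 == PySem.Int.mod (t - l) 2) = (PySem.Int.mod t 2 == 0) := by
  rw [PySem.Int.mod_eq_emod_of_pos (by omega), PySem.Int.mod_eq_emod_of_pos (by omega),
      PySem.Int.mod_eq_emod_of_pos (by omega)]
  by_cases h : t % 2 = 0 <;> simp [h] <;> omega

-- A's loop with a constant branch condition: the counter grows by the list length (b = true) or not at all
lemma foldl_const_count (f : Int → Int → Int) (cond : Int → Int → Bool) (b : Bool)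
    (hc : ∀ l i, cond l i = b) :
    ∀ (xs : List Int) (init : Int × Int),
      (xs.foldl (fun (st : Int × Int) i =>
        if cond (f st.1 i) i then (f st.1 i, st.2 + 1) else (f st.1 i, st.2)) init).2
      = init.2 + (if b then (xs.length : Int) else 0) := by
  intro xs
  induction xs with
  | nil => intro init; simp
  | cons x xs ih =>
    intro init
    rw [List.foldl_cons, hc]
    cases b
    · rw [if_neg (by simp), ih]
      simp
    · rw [if_pos rfl, ih]
      simp only [List.length_cons]
      push_cast; ring

-- ===== VERDICT (by name: the statement is the Claim_ definition above) =====
theorem countPartitions_spec : Claim_equal_countPartitions := by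
  intro nums _
  unfold Spec_countPartitions countPartitions countPartitions_alt
  simp only []
  rw [foldl_const_count (fun a i => a + (PySem.List.pyGet? nums i).getD 0)
        (fun l i => PySem.Int.mod l 2 == PySem.Int.mod (nums.sum - l) 2)
        (PySem.Int.mod nums.sum 2 == 0)
        (fun l _ => cond_iff nums.sum l)]
  simp [PySem.List.pyRange]
  split_ifs <;> omega
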